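-- pv_equiv track=rewrite | github.com/rayankasam/Logic | logic.py | outerParentheses
-- ===== SOURCE A (Python) =====
-- class Invalidexpression(Exception):
--     ...
--
-- def outerParentheses(expr):
--
--     istart = []  # stack of indices of opening parentheses
--     pairs = []
--
--     for i, c in enumerate(expr):
--         if c == '(':
--             istart.append(i)
--         if c == ')':
--             try:
--                 if len(istart) <= 1:
--                     pairs.append((istart.pop(), i))
--                 else:
--                     istart.pop()
--             except IndexError:
--                 raise Invalidexpression
--     if istart:  # check if stack is empty afterwards
--         raise Invalidexpression
--     return pairs
-- ===== SOURCE B (Python) =====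
-- class Invalidexpression(Exception):
--     ...
--
-- def outerParentheses(expr):
--     # depth counter + single start index instead of a stack of indices
--     pairs = []
--     depth = 0
--     start = 0
--     for i, c in enumerate(expr):
--         if c == '(':
--             if depth == 0:
--                 start = i
--             depth += 1
--         elif c == ')':
--             if depth == 0:
--                 raise Invalidexpression
--             depth -= 1
--             if depth == 0:
--                 pairs.append((start, i))
--     if depth:
--         raise Invalidexpression
--     return pairs
-- ===== Notes on version B (the rewrite author's own statement) =====
-- stated objective: simpler
-- what changed: Replaces the stack of opening-parenthesis indices with an integer depth counter plus a single remembered start index; a pair is emitted when the depth returns to zero.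
import Mathlib
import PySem

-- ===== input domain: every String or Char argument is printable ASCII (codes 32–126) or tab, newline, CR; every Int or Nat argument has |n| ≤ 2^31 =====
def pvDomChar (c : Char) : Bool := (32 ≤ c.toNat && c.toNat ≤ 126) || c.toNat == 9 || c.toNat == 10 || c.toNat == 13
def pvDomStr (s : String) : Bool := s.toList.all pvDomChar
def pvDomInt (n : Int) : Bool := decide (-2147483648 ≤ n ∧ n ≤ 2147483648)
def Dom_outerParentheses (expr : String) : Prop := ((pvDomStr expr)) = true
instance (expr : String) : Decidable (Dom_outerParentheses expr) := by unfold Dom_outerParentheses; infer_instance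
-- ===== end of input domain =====

-- B replaces A's stack of opening indices by a depth counter and one start index (simpler, O(1) space).
-- On unbalanced input the Python raises Invalidexpression; those inputs are excluded by Pre_ (the
-- ports return `none` there internally, unwrapped with `getD []`).

-- ===== PORT A =====
-- loop of A: stack `istart` (append/pop at the end), `pairs` accumulator; none = Invalidexpression
def goA : List (Int × Char) → List Int → List (Int × Int) → Option (List (Int × Int))
  | [], istart, pairs => if istart.isEmpty then some pairs else none
  | (i, c) :: rest, istart, pairs =>
    let istart := if c = '(' then istart ++ [i] else istart
    if c = ')' then
      if istart.length ≤ 1 then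
        match istart.getLast? with
        | none => none                                   -- istart.pop() raises IndexError
        | some s => goA rest istart.dropLast (pairs ++ [(s, i)])
      else goA rest istart.dropLast pairs
    else goA rest istart pairs

def outerParentheses (expr : String) : List (Int × Int) :=
  (goA (PySem.List.enumerate expr.toList) [] []).getD []

-- ===== PORT B =====
-- loop of B: depth counter and single start index; none = Invalidexpression
def goB : List (Int × Char) → Int → Int → List (Int × Int) → Option (List (Int × Int))
  | [], depth, _, pairs => if depth ≠ 0 then none else some pairs
  | (i, c) :: rest, depth, start, pairs =>
    if c = '(' then
      goB rest (depth + 1) (if depth = 0 then i else start) pairs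
    else if c = ')' then
      if depth = 0 then none
      else if depth - 1 = 0 then goB rest (depth - 1) start (pairs ++ [(start, i)])
      else goB rest (depth - 1) start pairs
    else goB rest depth start pairs

def outerParentheses_alt (expr : String) : List (Int × Int) :=
  (goB (PySem.List.enumerate expr.toList) 0 0 []).getD []

-- ===== PRECONDITION & SPEC =====
-- Pre_: the parentheses in expr are balanced — exactly the inputs on which the Python A
-- returns instead of raising Invalidexpression.
def Pre_outerParentheses (expr : String) : Prop :=
  expr.toList.count '(' = expr.toList.count ')' ∧
  ∀ n ∈ List.range (expr.toList.length + 1),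
    (expr.toList.take n).count ')' ≤ (expr.toList.take n).count '('
instance (expr : String) : Decidable (Pre_outerParentheses expr) := by
  unfold Pre_outerParentheses; infer_instance

def pvWitness_outerParentheses : String := "(a)(b(c))"

def Spec_outerParentheses (expr : String) (out : List (Int × Int)) : Prop := out = outerParentheses_alt expr
instance (expr : String) (out : List (Int × Int)) : Decidable (Spec_outerParentheses expr out) := by unfold Spec_outerParentheses; infer_instance

-- ===== CLAIM (what is proved, stated in full; the proofs are below) =====
def Claim_equal_outerParentheses : Prop := ∀ (expr : String), Dom_outerParentheses expr → Pre_outerParentheses expr → Spec_outerParentheses expr (outerParentheses expr)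

-- ===== LEMMAS AND PROOFS =====

-- Invariant linking the two loop states: depth is the stack height, and when the stack is
-- nonempty its BOTTOM element (the first, since A appends at the end) is B's start.
theorem goA_eq_goB (l : List (Int × Char)) :
    ∀ (istart : List Int) (depth start : Int) (pairs : List (Int × Int)),
      (istart.length : Int) = depth →
      (istart ≠ [] → istart.head? = some start) →
      goA l istart pairs = goB l depth start pairs := by
  induction l with
  | nil =>
    intro istart depth start pairs hlen hhead
    simp only [goA, goB]
    cases istart with
    | nil => simp at hlen ⊢; omega
    | cons a t => simp at hlen ⊢; omega
  | cons ic rest ih =>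
    obtain ⟨i, c⟩ := ic
    intro istart depth start pairs hlen hhead
    simp only [goA, goB]
    by_cases hop : c = '('
    · -- '(' pushed; it is not ')'
      have hne : ¬ c = ')' := by simp [hop]
      simp only [hop, if_pos rfl, if_neg (by decide : ¬ ('(' = ')'))]
      apply ih
      · simp; omega
      · intro _
        cases istart with
        | nil =>
          have : depth = 0 := by simp at hlen; omega
          simp [this]
        | cons a t =>
          have hd0 : ¬ depth = 0 := by simp at hlen; omega
          have := hhead (by simp)
          simp at this
          simp [hd0, this]
    · simp only [if_neg hop]
      by_cases hcl : c = ')'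
      · simp only [hcl, if_pos rfl]
        cases istart with
        | nil =>
          -- empty stack: A's pop raises, B sees depth = 0
          have hd0 : depth = 0 := by simp at hlen; omega
          simp [hd0]
        | cons a t =>
          have hd0 : ¬ depth = 0 := by simp at hlen; omega
          have hhd : a = start := by have := hhead (by simp); simpa using this
          cases t with
          | nil =>
            -- stack = [start]: A emits (start, i); B's depth goes to 0
            have hd1 : depth - 1 = 0 := by simp at hlen; omega
            simp only [List.length_cons, List.length_nil, if_neg hd0, if_pos hd1]
            simp only [if_pos (by omega : (0:Nat) + 1 ≤ 1), List.getLast?_singleton,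
              List.dropLast_singleton]
            rw [hhd]
            apply ih
            · simp; omega
            · intro h; simp at h
          | cons b t' =>
            -- stack height ≥ 2: A pops the top, head (bottom) unchanged
            have hd1 : ¬ depth - 1 = 0 := by simp at hlen; omega
            have hlenge : ¬ (b :: t').length + 1 ≤ 1 := by simp
            simp only [List.length_cons, if_neg hlenge, if_neg hd0, if_neg hd1]
            apply ih
            · simp at hlen ⊢; omega
            · intro _
              have : (a :: b :: t').dropLast.head? = some a := by
                cases t' <;> simp
              rw [this, hhd]
      · simp only [if_neg hcl]
        exact ih istart depth start pairs hlen hhead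

-- ===== VERDICT (by name: the statement is the Claim_ definition above) =====
theorem outerParentheses_spec : Claim_equal_outerParentheses := by
  intro expr _ _
  unfold Spec_outerParentheses outerParentheses outerParentheses_alt
  rw [goA_eq_goB (PySem.List.enumerate expr.toList) [] 0 0 [] (by simp) (by simp)]
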